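-- pv_equiv track=rewrite | github.com/amishacorns/qwix | scripts/plots_hf_unsloth/profile_down_proj.py | _select_weight_key
-- ===== SOURCE A (Python) =====
-- from typing import Optional, Tuple, List
--
-- def _select_weight_key(tensors: dict, pattern: str) -> str:
--   # Heuristic: match substring pattern and a typical leaf name
--   preferred_suffixes = ["weight", "kernel", "w", "_weight"]
--   matches = [k for k in tensors.keys() if pattern in k]
--   if not matches:
--     # Try replacing dots with slashes or vice versa if needed
--     alt = pattern.replace("/", ".")
--     matches = [k for k in tensors.keys() if alt in k]
--   if not matches:
--     raise KeyError(f"No tensors matched pattern '{pattern}'. Available example keys: {list(tensors.keys())[:10]}")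
--   # Prefer keys that end with common weight suffixes
--   def score(k: str) -> Tuple[int, int]:
--     suf_score = -1
--     for i, suf in enumerate(preferred_suffixes):
--       if k.endswith(suf) or k.endswith(suf + ":0"):
--         suf_score = -i  # earlier suffix gets higher score
--         break
--     # shorter key gets slight preference
--     return (suf_score, -len(k))
--   matches.sort(key=score, reverse=True)
--   return matches[0]
-- ===== SOURCE B (Python) =====
-- def _best(best, k, s):
--   # keep the better (key, score) pair; ties keep the earlier key
--   if best is None or s > best[1]:
--     return (k, s)
--   return best
--
-- def _select_weight_key(tensors: dict, pattern: str) -> str: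
--   # One linear pass over the keys: track the best pattern-match and the best
--   # fallback (dots-for-slashes) match simultaneously; no lists, no sort.
--   preferred_suffixes = ["weight", "kernel", "w", "_weight"]
--   alt = pattern.replace("/", ".")
--   def score(k):
--     suf_score = -1
--     for i, suf in enumerate(preferred_suffixes):
--       if k.endswith(suf) or k.endswith(suf + ":0"):
--         suf_score = -i
--         break
--     return (suf_score, -len(k))
--   best = None
--   best_alt = None
--   for k in tensors.keys():
--     if pattern in k:
--       best = _best(best, k, score(k))
--     elif alt in k:
--       best_alt = _best(best_alt, k, score(k))
--   if best is not None:
--     return best[0]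
--   if best_alt is not None:
--     return best_alt[0]
--   raise KeyError(f"No tensors matched pattern '{pattern}'. Available example keys: {list(tensors.keys())[:10]}")
-- ===== Notes on version B (the rewrite author's own statement) =====
-- stated objective: alternative
-- what changed: Instead of materialising the match list and fully sorting it by score (returning matches[0]), B streams once over the keys keeping the best pattern-match and the best fallback-match as running maxima (first-wins on ties, matching the stable descending sort).
import Mathlib
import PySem

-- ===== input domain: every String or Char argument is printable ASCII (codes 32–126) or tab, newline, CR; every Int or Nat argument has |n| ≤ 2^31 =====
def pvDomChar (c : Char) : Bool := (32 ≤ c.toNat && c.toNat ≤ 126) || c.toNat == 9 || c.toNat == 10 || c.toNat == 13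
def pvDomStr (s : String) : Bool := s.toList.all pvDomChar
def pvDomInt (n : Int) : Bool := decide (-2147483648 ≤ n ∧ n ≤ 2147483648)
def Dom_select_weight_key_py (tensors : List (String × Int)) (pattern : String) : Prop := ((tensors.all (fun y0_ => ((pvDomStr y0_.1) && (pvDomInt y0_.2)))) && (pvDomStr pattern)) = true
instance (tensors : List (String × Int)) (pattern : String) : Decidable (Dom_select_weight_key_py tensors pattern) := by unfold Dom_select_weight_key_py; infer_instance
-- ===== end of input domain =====

-- B replaces A's "collect matches, stable-sort by score descending, take [0]" by a single
-- linear pass over the keys that keeps the running best pattern-match and best fallback-match.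
-- Both programs raise KeyError when nothing matches; those inputs are excluded by Pre_.
-- Neither program mutates observable caller state through the Lean ports (A sorts a local list only).

-- ===== PORT A =====
-- shared helper: the Python inner 'score' (identical text in Source A and Source B)
def swkSufScore : List (Int × String) → String → Int
  | [], _ => -1
  | (i, suf) :: rest, k =>
    if PySem.Str.endswith k suf || PySem.Str.endswith k (suf ++ ":0") then -i
    else swkSufScore rest k

def swkScore (k : String) : Int × Int :=
  (swkSufScore (PySem.List.enumerate ["weight", "kernel", "w", "_weight"]) k,
   -(PySem.Str.len k : Int))

def select_weight_key_py (tensors : List (String × Int)) (pattern : String) : String :=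
  let keys := (PySem.Dict.ofList tensors).keys
  let ms := keys.filter (fun k => PySem.Str.isIn pattern k)
  let ms :=
    if ms.isEmpty then
      keys.filter (fun k => PySem.Str.isIn (PySem.Str.replace pattern "/" ".") k)
    else ms
  -- matches.sort(key=score, reverse=True); return matches[0]  ("" unreachable under Pre_: A raises KeyError)
  (PySem.List.sorted2 ms (fun k => (swkScore k).1) (fun k => (swkScore k).2) true).headD ""

-- ===== PORT B =====
-- Python tuple comparison s > b (lexicographic on the two Int components)
def swkBetter (s b : Int × Int) : Bool := decide (b.1 < s.1) || (decide (s.1 = b.1) && decide (b.2 < s.2))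

-- Source B helper _best
def swkUpd (best : Option (String × (Int × Int))) (k : String) (s : Int × Int) : Option (String × (Int × Int)) :=
  match best with
  | none => some (k, s)
  | some b => if swkBetter s b.2 then some (k, s) else some b

-- Source B loop body
def swkStep (pattern alt : String) (st : Option (String × (Int × Int)) × Option (String × (Int × Int)))
    (k : String) : Option (String × (Int × Int)) × Option (String × (Int × Int)) :=
  if PySem.Str.isIn pattern k then (swkUpd st.1 k (swkScore k), st.2)
  else if PySem.Str.isIn alt k then (st.1, swkUpd st.2 k (swkScore k))
  else st

def select_weight_key_py_alt (tensors : List (String × Int)) (pattern : String) : String :=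
  let alt := PySem.Str.replace pattern "/" "."
  let st := ((PySem.Dict.ofList tensors).keys).foldl (swkStep pattern alt) (none, none)
  match st.1 with
  | some b => b.1
  | none =>
    match st.2 with
    | some b => b.1
    | none => ""   -- B raises KeyError here; excluded by Pre_

-- ===== PRECONDITION & SPEC =====
-- Pre_ excludes exactly the inputs where A raises KeyError (no key contains the pattern
-- nor its '/'→'.' variant); B raises KeyError there too.
def Pre_select_weight_key_py (tensors : List (String × Int)) (pattern : String) : Prop :=
  tensors.any (fun p => PySem.Str.isIn pattern p.1
    || PySem.Str.isIn (PySem.Str.replace pattern "/" ".") p.1) = true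
instance (tensors : List (String × Int)) (pattern : String) : Decidable (Pre_select_weight_key_py tensors pattern) := by unfold Pre_select_weight_key_py; infer_instance

def pvWitness_select_weight_key_py : (List (String × Int)) × String :=
  ([("layers.0.down_proj.weight", 7), ("layers.0.up_proj.weight", 3)], "down_proj")

def Spec_select_weight_key_py (tensors : List (String × Int)) (pattern : String) (out : String) : Prop := out = select_weight_key_py_alt tensors pattern
instance (tensors : List (String × Int)) (pattern : String) (out : String) : Decidable (Spec_select_weight_key_py tensors pattern out) := by unfold Spec_select_weight_key_py; infer_instance

-- ===== CLAIM (what is proved, stated in full; the proofs are below) =====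
def Claim_equal_select_weight_key_py : Prop := ∀ (tensors : List (String × Int)) (pattern : String), Dom_select_weight_key_py tensors pattern → Pre_select_weight_key_py tensors pattern → Spec_select_weight_key_py tensors pattern (select_weight_key_py tensors pattern)

-- ===== LEMMAS AND PROOFS =====

-- the strict-less-than sorted2 uses on the tuple key (lexicographic)
def swkLt (m x : String) : Bool :=
  decide ((swkScore m).1 < (swkScore x).1)
  || (!decide ((swkScore x).1 < (swkScore m).1) && decide ((swkScore m).2 < (swkScore x).2))

lemma swkBetter_eq_swkLt (x m : String) : swkBetter (swkScore x) (swkScore m) = swkLt m x := by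
  simp only [swkBetter, swkLt]
  by_cases h1 : (swkScore m).1 < (swkScore x).1 <;>
    by_cases h2 : (swkScore x).1 < (swkScore m).1 <;>
    by_cases h3 : (swkScore x).1 = (swkScore m).1 <;>
    simp [h1, h2, h3]
  all_goals omega

-- the running-best fold on plain pairs
def swkBf (b : String × (Int × Int)) (k : String) : String × (Int × Int) :=
  if swkBetter (swkScore k) b.2 then (k, swkScore k) else b

-- B's per-element optional best update
def swkG (st : Option (String × (Int × Int))) (k : String) : Option (String × (Int × Int)) :=
  swkUpd st k (swkScore k)

lemma swkG_none (k : String) : swkG none k = some (k, swkScore k) := rfl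

lemma swkG_some (b : String × (Int × Int)) (k : String) : swkG (some b) k = some (swkBf b k) := by
  cases h : swkBetter (swkScore k) b.2 <;> simp [swkG, swkUpd, swkBf, h]

lemma head?_insertBy {α : Type} (before : α → α → Bool) (x : α) (s : List α) :
    (PySem.List.insertBy before x s).head? =
      some (s.head?.elim x (fun y => if before x y then x else y)) := by
  cases s with
  | nil => rfl
  | cons y ys =>
    simp only [PySem.List.insertBy, List.head?_cons, Option.elim_some]
    by_cases h : before x y = true <;> simp [h]

lemma head?_foldl_insertBy {α : Type} (before : α → α → Bool) :
    ∀ (l s : List α),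
      (l.foldl (fun acc x => PySem.List.insertBy before x acc) s).head? =
        l.foldl (fun b x => some (b.elim x (fun m => if before x m then x else m))) s.head? := by
  intro l
  induction l with
  | nil => intro s; rfl
  | cons x t ih =>
    intro s
    simp only [List.foldl_cons]
    rw [ih, head?_insertBy]

lemma sorted2_rev_eq (l : List String) :
    PySem.List.sorted2 l (fun k => (swkScore k).1) (fun k => (swkScore k).2) true =
      l.foldl (fun acc x => PySem.List.insertBy (fun a b => swkLt b a) x acc) [] := by
  rfl

-- plain-pair fold: key of running best equals the bare-key running max, given the invariant
lemma foldl_swkBf_fst :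
    ∀ (l : List String) (b : String × (Int × Int)), b.2 = swkScore b.1 →
      (l.foldl swkBf b).1 = l.foldl (fun m x => if swkLt m x then x else m) b.1 := by
  intro l
  induction l with
  | nil => intro b _; rfl
  | cons x t ih =>
    intro b hb
    simp only [List.foldl_cons]
    have hstep : swkBf b x = if swkLt b.1 x then (x, swkScore x) else b := by
      simp only [swkBf, hb, swkBetter_eq_swkLt]
    rw [hstep]
    by_cases h : swkLt b.1 x = true
    · simpa [h] using ih (x, swkScore x) rfl
    · simpa [h] using ih b hb

lemma foldl_swkG_some :
    ∀ (t : List String) (b : String × (Int × Int)),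
      t.foldl swkG (some b) = some (t.foldl swkBf b) := by
  intro t
  induction t with
  | nil => intro b; rfl
  | cons y ys ih =>
    intro b
    simp only [List.foldl_cons, swkG_some]
    exact ih _

lemma foldl_opt_some :
    ∀ (t : List String) (m0 : String),
      t.foldl (fun b x => some (b.elim x (fun m => if swkLt m x then x else m))) (some m0)
        = some (t.foldl (fun m x => if swkLt m x then x else m) m0) := by
  intro t
  induction t with
  | nil => intro m0; rfl
  | cons y ys ih =>
    intro m0
    simp only [List.foldl_cons]
    exact ih _

-- optional fold (B) vs optional fold (head of A's sorted list), from state none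
lemma foldl_swkG_none (l : List String) :
    (l.foldl swkG none).map Prod.fst =
      l.foldl (fun b x => some (b.elim x (fun m => if swkLt m x then x else m))) none := by
  cases l with
  | nil => rfl
  | cons m t =>
    simp only [List.foldl_cons, swkG_none, Option.elim_none]
    rw [foldl_swkG_some t (m, swkScore m), foldl_opt_some t m]
    simp [foldl_swkBf_fst t (m, swkScore m) rfl]

-- central: head of A's descending stable sort = key of B's running best
lemma central (l : List String) :
    (PySem.List.sorted2 l (fun k => (swkScore k).1) (fun k => (swkScore k).2) true).headD "" =
      (match l.foldl swkG none with | some b => b.1 | none => "") := by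
  rw [List.headD_eq_head?_getD, sorted2_rev_eq]
  rw [head?_foldl_insertBy (fun a b => swkLt b a) l [], List.head?_nil, ← foldl_swkG_none]
  cases l.foldl swkG none <;> rfl

-- B's fold splits into two independent filtered folds
lemma foldl_swkStep (pattern alt : String) :
    ∀ (l : List String) (st : Option (String × (Int × Int)) × Option (String × (Int × Int))),
      l.foldl (swkStep pattern alt) st =
        ((l.filter (fun k => PySem.Str.isIn pattern k)).foldl swkG st.1,
         (l.filter (fun k => !PySem.Str.isIn pattern k && PySem.Str.isIn alt k)).foldl swkG st.2) := by
  intro l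
  induction l with
  | nil => intro st; rfl
  | cons k t ih =>
    intro st
    simp only [List.foldl_cons, List.filter_cons]
    by_cases hp : PySem.Str.isIn pattern k = true
    · rw [show swkStep pattern alt st k = (swkG st.1 k, st.2) from by unfold swkStep; rw [if_pos hp]; rfl]
      rw [ih, if_pos hp, if_neg (by rw [hp]; simp)]
      rfl
    · have hp' : PySem.Str.isIn pattern k = false := by simpa using hp
      by_cases ha : PySem.Str.isIn alt k = true
      · rw [show swkStep pattern alt st k = (st.1, swkG st.2 k) from by
            unfold swkStep; rw [if_neg (by rw [hp']; simp), if_pos ha]; rfl]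
        rw [ih, if_neg (by rw [hp']; simp), if_pos (by rw [hp', ha]; rfl)]
        rfl
      · have ha' : PySem.Str.isIn alt k = false := by simpa using ha
        rw [show swkStep pattern alt st k = st from by
            unfold swkStep; rw [if_neg (by rw [hp']; simp), if_neg (by rw [ha']; simp)]]
        rw [ih, if_neg (by rw [hp']; simp), if_neg (by rw [ha']; simp)]

lemma foldl_swkG_some_ne_none (ys : List String) (b : String × (Int × Int)) :
    ys.foldl swkG (some b) ≠ none := by
  rw [foldl_swkG_some]
  exact Option.some_ne_none _

-- ===== VERDICT (by name: the statement is the Claim_ definition above) =====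
theorem select_weight_key_py_spec : Claim_equal_select_weight_key_py := by
  intro tensors pattern _ _
  unfold Spec_select_weight_key_py select_weight_key_py select_weight_key_py_alt
  dsimp only []
  set keys := (PySem.Dict.ofList tensors).keys with hkeys
  set alt := PySem.Str.replace pattern "/" "." with halt
  rw [foldl_swkStep pattern alt keys (none, none)]
  by_cases hemp : keys.filter (fun k => PySem.Str.isIn pattern k) = []
  · -- no key contains the pattern: A falls back to the alt matches; B's first slot stays none
    have hq : keys.filter (fun k => !PySem.Str.isIn pattern k && PySem.Str.isIn alt k)
        = keys.filter (fun k => PySem.Str.isIn alt k) := by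
      apply List.filter_congr
      intro x hx
      have := List.filter_eq_nil_iff.mp hemp x hx
      simp at this
      simp [this]
    rw [hemp, hq]
    simp only [List.foldl_nil, List.isEmpty_nil, if_pos]
    exact central _
  · have hne : (keys.filter (fun k => PySem.Str.isIn pattern k)).isEmpty = false := by
      simpa [List.isEmpty_iff] using hemp
    rw [hne]
    simp only [Bool.false_eq_true, if_false]
    rw [central _]
    cases hfold : (keys.filter (fun k => PySem.Str.isIn pattern k)).foldl swkG none with
    | none =>
      exfalso
      cases hmt : keys.filter (fun k => PySem.Str.isIn pattern k) with
      | nil => exact hemp hmt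
      | cons m t =>
        rw [hmt] at hfold
        simp only [List.foldl_cons, swkG_none] at hfold
        exact foldl_swkG_some_ne_none t (m, swkScore m) hfold
    | some b => rfl
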